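-- pv_equiv track=rewrite | github.com/grapatin/AOC2021 | src/day17/day17.py | find_possible_xv
-- ===== SOURCE A (Python) =====
-- def calculate_x_steps(start_x_vel):
--     start_x = 0
--     current_x_pos = start_x
--     current_x_vel = start_x_vel
--     pos_x_list = [start_x]
--     while (current_x_vel != 0):
--         current_x_pos += current_x_vel
--         current_x_vel -= 1
--         pos_x_list.append(current_x_pos)
--
--     return pos_x_list
--
-- def find_possible_xv(min_x_target, max_x_target):
--     xv = {}
--     for x_v in range(6, max_x_target+1):
--         x_pos_list = calculate_x_steps(x_v)
--         for value in x_pos_list: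
--             if min_x_target <= value <= max_x_target:
--                 if x_v in xv:
--                     xv[x_v] += 1
--                 else:
--                     xv[x_v] = 1
--     return xv
-- ===== SOURCE B (Python) =====
-- def _bisect(pred, a, b):
--     # first k in [a, b) with pred(k) true (pred monotone), else b
--     while a < b:
--         m = (a + b) // 2
--         if pred(m):
--             b = m
--         else:
--             a = m + 1
--     return a
--
--
-- def find_possible_xv(min_x_target, max_x_target):
--     # x-position after k steps with start velocity v is v*k - k*(k-1)//2,
--     # nondecreasing for k in [0, v]; count the in-range steps by two binary searches.
--     xv = {}
--     for v in range(6, max_x_target + 1):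
--         lo = _bisect(lambda k: v * k - k * (k - 1) // 2 >= min_x_target, 0, v + 1)
--         hi = _bisect(lambda k: v * k - k * (k - 1) // 2 > max_x_target, 0, v + 1)
--         if hi - lo > 0:
--             xv[v] = hi - lo
--     return xv
-- ===== Notes on version B (the rewrite author's own statement) =====
-- stated objective: faster
-- what changed: Per x-velocity, B replaces simulating the probe's whole position list and counting the in-range entries with two binary searches over the closed-form position v*k - k*(k-1)//2, which is nondecreasing in k on [0, v].
import Mathlib
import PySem

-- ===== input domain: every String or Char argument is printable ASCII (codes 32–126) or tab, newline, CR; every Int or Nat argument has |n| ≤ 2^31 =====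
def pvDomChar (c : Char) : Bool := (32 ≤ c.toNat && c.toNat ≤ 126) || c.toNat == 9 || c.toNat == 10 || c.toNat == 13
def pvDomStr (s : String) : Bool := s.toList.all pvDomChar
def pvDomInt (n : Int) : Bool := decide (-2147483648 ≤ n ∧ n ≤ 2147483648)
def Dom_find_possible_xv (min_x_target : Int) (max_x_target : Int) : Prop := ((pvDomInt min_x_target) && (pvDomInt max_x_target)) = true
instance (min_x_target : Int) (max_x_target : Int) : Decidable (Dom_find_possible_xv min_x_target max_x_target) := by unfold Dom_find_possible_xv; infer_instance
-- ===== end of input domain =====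

-- B replaces A's per-velocity position-list simulation by two binary searches over the
-- closed-form position formula (objective: faster).

-- ===== PORT A =====
-- the while loop of calculate_x_steps; A only calls it with start velocity ≥ 6, where the
-- loop runs exactly vel iterations, so fuel vel.toNat makes the port exact there.
def calcLoop : Nat → Int → Int → List Int
  | 0, _, _ => []
  | n + 1, pos, vel =>
    if vel ≠ 0 then (pos + vel) :: calcLoop n (pos + vel) (vel - 1)
    else []

def calculate_x_steps (start_x_vel : Int) : List Int :=
  0 :: calcLoop start_x_vel.toNat 0 start_x_vel

def find_possible_xv (min_x_target : Int) (max_x_target : Int) : List (Int × Int) :=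
  ((PySem.List.pyRange 6 (max_x_target + 1) 1).foldl (fun xv x_v =>
    (calculate_x_steps x_v).foldl (fun xv value =>
      if min_x_target ≤ value ∧ value ≤ max_x_target then
        if xv.contains x_v then xv.modify x_v 0 (· + 1) else xv.insert x_v 1
      else xv) xv) (PySem.Dict.empty : PySem.Dict Int Int)).items

-- ===== PORT B =====
-- Source B's lambda k: v*k - k*(k-1)//2
def xpos (v : Int) (k : Int) : Int := v * k - PySem.Int.floordiv (k * (k - 1)) 2

-- Source B's _bisect while loop; fuel = initial (b - a).toNat (the interval shrinks every step)
def bisect (p : Int → Bool) : Nat → Int → Int → Int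
  | 0, a, _ => a
  | n + 1, a, b =>
    if a < b then
      if p (PySem.Int.floordiv (a + b) 2) then bisect p n a (PySem.Int.floordiv (a + b) 2)
      else bisect p n (PySem.Int.floordiv (a + b) 2 + 1) b
    else a

def find_possible_xv_alt (min_x_target : Int) (max_x_target : Int) : List (Int × Int) :=
  ((PySem.List.pyRange 6 (max_x_target + 1) 1).foldl (fun xv v =>
    let lo := bisect (fun k => decide (xpos v k ≥ min_x_target)) (v + 1 - 0).toNat 0 (v + 1)
    let hi := bisect (fun k => decide (xpos v k > max_x_target)) (v + 1 - 0).toNat 0 (v + 1)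
    if hi - lo > 0 then xv.insert v (hi - lo) else xv) (PySem.Dict.empty : PySem.Dict Int Int)).items

-- ===== PRECONDITION & SPEC =====
def Spec_find_possible_xv (min_x_target : Int) (max_x_target : Int) (out : List (Int × Int)) : Prop := out = find_possible_xv_alt min_x_target max_x_target
instance (min_x_target : Int) (max_x_target : Int) (out : List (Int × Int)) : Decidable (Spec_find_possible_xv min_x_target max_x_target out) := by unfold Spec_find_possible_xv; infer_instance

-- ===== CLAIM (what is proved, stated in full; the proofs are below) =====
def Claim_equal_find_possible_xv : Prop := ∀ (min_x_target : Int) (max_x_target : Int), Dom_find_possible_xv min_x_target max_x_target → Spec_find_possible_xv min_x_target max_x_target (find_possible_xv min_x_target max_x_target)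

-- ===== LEMMAS AND PROOFS =====

theorem fd2_shift (t k : Int) : PySem.Int.floordiv (t + k * 2) 2 = PySem.Int.floordiv t 2 + k := by
  simp [PySem.Int.floordiv, Int.add_mul_fdiv_right t k (by norm_num : (2:Int) ≠ 0)]

theorem xpos_zero (v : Int) : xpos v 0 = 0 := by simp [xpos, PySem.Int.floordiv]

theorem xpos_succ (v k : Int) : xpos v (k + 1) = xpos v k + (v - k) := by
  have h : (k + 1) * ((k + 1) - 1) = k * (k - 1) + k * 2 := by ring
  simp only [xpos, h, fd2_shift]; ring

theorem xpos_rec (w k : Int) : xpos w (k + 1) = w + xpos (w - 1) k := by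
  rw [xpos_succ]
  have h : k * (k - 1) = k * (k - 1) := rfl
  have h2 : (w - 1) * k = w * k - k := by ring
  simp only [xpos, h2]; ring

theorem xpos_mono (v : Int) : ∀ (n : Nat) (a b : Int), 0 ≤ a → a ≤ b → b ≤ v + 1 → b - a = n → xpos v a ≤ xpos v b := by
  intro n
  induction n with
  | zero =>
    intro a b _ _ _ h
    have he : a = b := by omega
    exact le_of_eq (congrArg (xpos v) he)
  | succ m ih =>
    intro a b ha hab hb h
    have h1 : xpos v a ≤ xpos v (a + 1) := by
      rw [xpos_succ]; omega
    have := ih (a + 1) b (by omega) (by omega) hb (by omega)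
    omega
theorem xpos_one (v : Int) : xpos v 1 = v := by
  have := xpos_succ v 0
  rw [xpos_zero] at this
  simpa using this

theorem calcLoop_eq : ∀ (n : Nat) (pos : Int),
    calcLoop n pos (n : Int) = (List.range n).map (fun (j : Nat) => pos + xpos (n : Int) ((j : Int) + 1)) := by
  intro n
  induction n with
  | zero => intro pos; simp [calcLoop]
  | succ m ih =>
    intro pos
    have hne : ((m : Int) + 1) ≠ 0 := by omega
    have hc : ((m + 1 : Nat) : Int) = (m : Int) + 1 := by push_cast; ring
    rw [List.range_succ_eq_map, List.map_cons, List.map_map]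
    simp only [calcLoop, hc]
    rw [if_pos hne]
    have ht : (m : Int) + 1 - 1 = (m : Int) := by ring
    rw [ht, ih (pos + ((m : Int) + 1))]
    congr 1
    · rw [show ((0 : Nat) : Int) = 0 by norm_num, zero_add, xpos_one]
    · apply List.map_congr_left
      intro j _
      simp only [Function.comp]
      have hj : ((j.succ : Nat) : Int) + 1 = ((j : Int) + 1) + 1 := by push_cast; ring
      rw [hj, xpos_rec ((m : Int) + 1) ((j : Int) + 1)]
      have : (m : Int) + 1 - 1 = (m : Int) := by ring
      rw [this]
      ring
theorem calc_eq (v : Int) (hv : 0 ≤ v) :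
    calculate_x_steps v = (List.range (v.toNat + 1)).map (fun (j : Nat) => xpos v (j : Int)) := by
  have hcast : ((v.toNat : Nat) : Int) = v := by omega
  rw [List.range_succ_eq_map, List.map_cons, List.map_map]
  unfold calculate_x_steps
  rw [show ((0 : Nat) : Int) = 0 by norm_num, xpos_zero]
  congr 1
  conv_lhs => rw [show v = ((v.toNat : Nat) : Int) from hcast.symm]
  rw [Int.toNat_natCast, calcLoop_eq v.toNat 0]
  apply List.map_congr_left
  intro j _
  simp only [Function.comp]
  rw [hcast]
  have : ((j.succ : Nat) : Int) = (j : Int) + 1 := by push_cast; ring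
  rw [this, zero_add]
theorem bisect_spec (p : Int → Bool) :
    ∀ (fuel : Nat) (a b : Int), a ≤ b → (b - a).toNat ≤ fuel →
    (∀ j k, a ≤ j → j ≤ k → k < b → p j = true → p k = true) →
    a ≤ bisect p fuel a b ∧ bisect p fuel a b ≤ b ∧
      (∀ k, a ≤ k → k < bisect p fuel a b → p k = false) ∧
      (∀ k, bisect p fuel a b ≤ k → k < b → p k = true) := by
  intro fuel
  induction fuel with
  | zero =>
    intro a b hab hf _
    have : a = b := by omega
    subst this
    refine ⟨le_refl _, le_refl _, ?_, ?_⟩ <;> (intro k h1 h2; simp only [bisect] at *; omega)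
  | succ n ih =>
    intro a b hab hf hmono
    by_cases hlt : a < b
    · simp only [bisect, if_pos hlt]
      have hmid := PySem.Int.floordiv_two_mid_bounds (le_of_lt hlt)
      set m := PySem.Int.floordiv (a + b) 2 with hm
      have hmb : m < b := by
        have := PySem.Int.floordiv_lt_iff_lt_mul (a := a + b) (b := 2) (q := b) (by norm_num)
        rw [← hm] at this
        exact this.mpr (by omega)
      by_cases hp : p m = true
      · rw [if_pos hp]
        have hmono' : ∀ j k, a ≤ j → j ≤ k → k < m → p j = true → p k = true := by
          intro j k h1 h2 h3 h4; exact hmono j k h1 h2 (by omega) h4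
        obtain ⟨h1, h2, h3, h4⟩ := ih a m (by omega) (by omega) hmono'
        refine ⟨h1, by omega, h3, ?_⟩
        intro k hk1 hk2
        by_cases hkm : k < m
        · exact h4 k hk1 hkm
        · exact hmono m k (by omega) (by omega) hk2 hp
      · rw [if_neg hp]
        have hpm : p m = false := by
          cases h : p m
          · rfl
          · exact absurd h hp
        have hmono' : ∀ j k, m + 1 ≤ j → j ≤ k → k < b → p j = true → p k = true := by
          intro j k h1 h2 h3 h4; exact hmono j k (by omega) h2 h3 h4
        obtain ⟨h1, h2, h3, h4⟩ := ih (m + 1) b (by omega) (by omega) hmono'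
        refine ⟨by omega, h2, ?_, h4⟩
        intro k hk1 hk2
        by_cases hkm : m + 1 ≤ k
        · exact h3 k hkm hk2
        · cases h : p k
          · rfl
          · exact absurd (hmono k m hk1 (by omega) hmb h) (by simp [hpm])
    · simp only [bisect, if_neg hlt]
      refine ⟨le_refl _, hab, ?_, ?_⟩ <;> (intro k h1 h2; omega)
theorem cntR : ∀ (n : Nat) (a b : Int),
    (List.range n).countP (fun (j : Nat) => decide (a ≤ (j : Int) ∧ (j : Int) < b)) =
      (min b (n : Int) - max a 0).toNat := by
  intro n a b
  induction n with
  | zero => simp only [List.range_zero, List.countP_nil, Nat.cast_zero]; omega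
  | succ m ih =>
    rw [List.range_succ, List.countP_append, ih]
    simp only [List.countP_singleton]
    by_cases h : a ≤ (m : Int) ∧ (m : Int) < b
    · rw [if_pos (by simpa using h)]
      omega
    · rw [if_neg (by simpa using h)]
      omega
theorem contains_false_of_not_mem (d : PySem.Dict Int Int) (v : Int) (h : v ∉ d.keys) :
    d.contains v = false := by
  cases hc : d.contains v
  · rfl
  · exact absurd ((PySem.Dict.contains_iff_mem_keys d v).mp hc) h

theorem insert_fresh (d : PySem.Dict Int Int) (v w : Int) (h : v ∉ d.keys) :
    d.insert v w = PySem.Dict.mk (d.items ++ [(v, w)]) := by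
  have hc := contains_false_of_not_mem d v h
  simp [PySem.Dict.insert, hc]

theorem insert_last (L : List (Int × Int)) (v m w : Int) (hv : ∀ p ∈ L, p.1 ≠ v) :
    (PySem.Dict.mk (L ++ [(v, m)])).insert v w = PySem.Dict.mk (L ++ [(v, w)]) := by
  have hc : (PySem.Dict.mk (L ++ [(v, m)])).contains v = true := by
    simp [PySem.Dict.contains]
  simp only [PySem.Dict.insert, hc, if_pos]
  congr 1
  simp only [List.map_append]
  congr 1
  · conv_rhs => rw [← List.map_id L]
    apply List.map_congr_left
    intro p hp
    rw [if_neg (by simpa using hv p hp)]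
    rfl
  · simp

theorem getD_last (L : List (Int × Int)) (v m : Int) (hv : ∀ p ∈ L, p.1 ≠ v) :
    (PySem.Dict.mk (L ++ [(v, m)])).getD v 0 = m := by
  simp only [PySem.Dict.getD, PySem.Dict.get?]
  rw [List.find?_append]
  have h1 : L.find? (fun p => p.1 == v) = none := by
    rw [List.find?_eq_none]
    intro p hp
    simpa using hv p hp
  simp [h1]

theorem getD_fresh (d : PySem.Dict Int Int) (v : Int) (h : v ∉ d.keys) :
    d.getD v 0 = 0 := by
  simp only [PySem.Dict.getD, PySem.Dict.get?]
  have : d.items.find? (fun p => p.1 == v) = none := by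
    rw [List.find?_eq_none]
    intro p hp
    have : p.1 ∈ d.keys := List.mem_map_of_mem hp
    simp only [beq_iff_eq]
    intro he
    exact h (he ▸ this)
  simp [this]
theorem phase2 (v : Int) : ∀ (l : List Int) (L : List (Int × Int)) (m : Int), (∀ p ∈ L, p.1 ≠ v) →
    l.foldl (fun d _ => d.insert v (d.getD v 0 + 1)) (PySem.Dict.mk (L ++ [(v, m)])) =
      PySem.Dict.mk (L ++ [(v, m + l.length)]) := by
  intro l
  induction l with
  | nil => intro L m _; simp
  | cons x xs ih =>
    intro L m hv
    rw [List.foldl_cons, getD_last L v m hv, insert_last L v m (m + 1) hv, ih L (m + 1) hv]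
    congr 4
    simp only [List.length_cons]
    push_cast
    ring

theorem phase1 (v : Int) (l : List Int) (d : PySem.Dict Int Int) (h : v ∉ d.keys) :
    l.foldl (fun d _ => d.insert v (d.getD v 0 + 1)) d =
      if l.length = 0 then d else PySem.Dict.mk (d.items ++ [(v, (l.length : Int))]) := by
  cases l with
  | nil => simp
  | cons x xs =>
    rw [List.foldl_cons, getD_fresh d v h, insert_fresh d v (0 + 1) h]
    have hv : ∀ p ∈ d.items, p.1 ≠ v := by
      intro p hp he
      exact h (he ▸ List.mem_map_of_mem hp)
    rw [show (0 : Int) + 1 = 1 by ring, phase2 v xs d.items 1 hv]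
    simp only [List.length_cons, if_neg (by omega : ¬ (xs.length + 1 = 0))]
    congr 4
    push_cast
    ring

theorem innerA_eq (mn mx v : Int) (l : List Int) (d : PySem.Dict Int Int) (h : v ∉ d.keys) :
    l.foldl (fun xv value =>
      if mn ≤ value ∧ value ≤ mx then
        if xv.contains v then xv.modify v 0 (· + 1) else xv.insert v 1
      else xv) d =
    (if l.countP (fun value => decide (mn ≤ value ∧ value ≤ mx)) = 0 then d
     else PySem.Dict.mk (d.items ++ [(v, (l.countP (fun value => decide (mn ≤ value ∧ value ≤ mx)) : Int))])) := by
  have hstep : (fun (xv : PySem.Dict Int Int) (value : Int) =>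
      if mn ≤ value ∧ value ≤ mx then
        if xv.contains v then xv.modify v 0 (· + 1) else xv.insert v 1
      else xv) = (fun xv value =>
      if (decide (mn ≤ value ∧ value ≤ mx)) = true then xv.insert v (xv.getD v 0 + 1) else xv) := by
    funext xv value
    by_cases hq : mn ≤ value ∧ value ≤ mx
    · rw [if_pos hq, if_pos (show (decide (mn ≤ value ∧ value ≤ mx)) = true from by simpa using hq)]
      by_cases hc : xv.contains v = true
      · rw [if_pos hc]
        rfl
      · rw [if_neg hc, PySem.Dict.getD_of_not_contains xv 0 (by simpa using hc)]
        norm_num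
    · rw [if_neg hq, if_neg (show ¬ (decide (mn ≤ value ∧ value ≤ mx)) = true from by simpa using hq)]
  rw [hstep, ← List.foldl_filter, phase1 v _ d h, List.countP_eq_length_filter]
theorem count_eq (mn mx v : Int) (hv : 0 ≤ v) :
    (calculate_x_steps v).countP (fun value => decide (mn ≤ value ∧ value ≤ mx)) =
      (bisect (fun k => decide (xpos v k > mx)) (v + 1 - 0).toNat 0 (v + 1) -
       bisect (fun k => decide (xpos v k ≥ mn)) (v + 1 - 0).toNat 0 (v + 1)).toNat := by
  have hN : ((v.toNat + 1 : Nat) : Int) = v + 1 := by omega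
  have hmono : ∀ (j k : Int), 0 ≤ j → j ≤ k → k < v + 1 → xpos v j ≤ xpos v k := by
    intro j k h1 h2 h3
    exact xpos_mono v (k - j).toNat j k h1 h2 (by omega) (by omega)
  have hlo := bisect_spec (fun k => decide (xpos v k ≥ mn)) (v + 1 - 0).toNat 0 (v + 1)
    (by omega) (by omega)
    (by
      intro j k h1 h2 h3 h4
      simp only [decide_eq_true_eq, ge_iff_le] at *
      have := hmono j k h1 h2 h3
      omega)
  have hhi := bisect_spec (fun k => decide (xpos v k > mx)) (v + 1 - 0).toNat 0 (v + 1)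
    (by omega) (by omega)
    (by
      intro j k h1 h2 h3 h4
      simp only [decide_eq_true_eq, gt_iff_lt] at *
      have := hmono j k h1 h2 h3
      omega)
  set lo := bisect (fun k => decide (xpos v k ≥ mn)) (v + 1 - 0).toNat 0 (v + 1) with hlodef
  set hi := bisect (fun k => decide (xpos v k > mx)) (v + 1 - 0).toNat 0 (v + 1) with hhidef
  obtain ⟨hlo1, hlo2, hlo3, hlo4⟩ := hlo
  obtain ⟨hhi1, hhi2, hhi3, hhi4⟩ := hhi
  rw [calc_eq v hv, List.countP_map]
  have hpt : ∀ j ∈ List.range (v.toNat + 1),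
      ((fun value => decide (mn ≤ value ∧ value ≤ mx)) ∘ (fun (j : Nat) => xpos v (j : Int))) j =
        (fun (j : Nat) => decide (lo ≤ (j : Int) ∧ (j : Int) < hi)) j := by
    intro j hj
    rw [List.mem_range] at hj
    have hjN : (j : Int) < v + 1 := by omega
    have hj0 : (0 : Int) ≤ (j : Int) := by omega
    simp only [Function.comp, decide_eq_decide]
    constructor
    · rintro ⟨ha, hb⟩
      constructor
      · by_contra hc
        have := hlo3 (j : Int) hj0 (by omega)
        simp at this
        omega
      · by_contra hc
        have := hhi4 (j : Int) (by omega) hjN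
        simp at this
        omega
    · rintro ⟨ha, hb⟩
      constructor
      · have := hlo4 (j : Int) ha hjN
        simp at this
        omega
      · have := hhi3 (j : Int) hj0 hb
        simp at this
        omega
  rw [List.countP_congr (fun x hx => by rw [hpt x hx]), cntR (v.toNat + 1) lo hi, hN]
  omega
def gA (mn mx : Int) : PySem.Dict Int Int → Int → PySem.Dict Int Int := fun xv x_v =>
  (calculate_x_steps x_v).foldl (fun xv value =>
    if mn ≤ value ∧ value ≤ mx then
      if xv.contains x_v then xv.modify x_v 0 (· + 1) else xv.insert x_v 1
    else xv) xv

def gB (mn mx : Int) : PySem.Dict Int Int → Int → PySem.Dict Int Int := fun xv v =>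
  let lo := bisect (fun k => decide (xpos v k ≥ mn)) (v + 1 - 0).toNat 0 (v + 1)
  let hi := bisect (fun k => decide (xpos v k > mx)) (v + 1 - 0).toNat 0 (v + 1)
  if hi - lo > 0 then xv.insert v (hi - lo) else xv

theorem stepAB (mn mx : Int) (d : PySem.Dict Int Int) (v : Int) (hv6 : 0 ≤ v)
    (hk : v ∉ d.keys) : gA mn mx d v = gB mn mx d v := by
  have hc := count_eq mn mx v hv6
  set c := (calculate_x_steps v).countP (fun value => decide (mn ≤ value ∧ value ≤ mx)) with hcdef
  set lo := bisect (fun k => decide (xpos v k ≥ mn)) (v + 1 - 0).toNat 0 (v + 1) with hlodef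
  set hi := bisect (fun k => decide (xpos v k > mx)) (v + 1 - 0).toNat 0 (v + 1) with hhidef
  have hA := innerA_eq mn mx v (calculate_x_steps v) d hk
  rw [← hcdef] at hA
  show gA mn mx d v = (if hi - lo > 0 then d.insert v (hi - lo) else d)
  rw [gA, hA]
  by_cases hpos : hi - lo > 0
  · rw [if_pos hpos, if_neg (by omega : ¬ c = 0), insert_fresh d v (hi - lo) hk]
    congr 4
    omega
  · rw [if_neg hpos, if_pos (by omega : c = 0)]

theorem keysA (mn mx : Int) (d : PySem.Dict Int Int) (v : Int) (hk : v ∉ d.keys) :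
    (gA mn mx d v).keys = d.keys ∨ (gA mn mx d v).keys = d.keys ++ [v] := by
  rw [gA, innerA_eq mn mx v (calculate_x_steps v) d hk]
  by_cases h : (calculate_x_steps v).countP (fun value => decide (mn ≤ value ∧ value ≤ mx)) = 0
  · left; rw [if_pos h]
  · right
    rw [if_neg h]
    simp [PySem.Dict.keys]

theorem outer (mn mx : Int) : ∀ (N : Nat),
    ((PySem.List.pyRange 6 (6 + (N : Int)) 1).foldl (gA mn mx) (PySem.Dict.empty : PySem.Dict Int Int) =
     (PySem.List.pyRange 6 (6 + (N : Int)) 1).foldl (gB mn mx) (PySem.Dict.empty : PySem.Dict Int Int)) ∧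
    ((PySem.List.pyRange 6 (6 + (N : Int)) 1).foldl (gA mn mx) (PySem.Dict.empty : PySem.Dict Int Int)).keys.Nodup ∧
    (∀ k ∈ ((PySem.List.pyRange 6 (6 + (N : Int)) 1).foldl (gA mn mx) (PySem.Dict.empty : PySem.Dict Int Int)).keys,
      k < 6 + (N : Int)) := by
  intro N
  induction N with
  | zero =>
    rw [show (6 : Int) + ((0 : Nat) : Int) = 6 by norm_num, PySem.List.pyRange_one_eq_nil (by omega)]
    refine ⟨rfl, ?_, ?_⟩
    · simp [PySem.Dict.empty, PySem.Dict.keys]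
    · intro k hk
      simp [PySem.Dict.empty, PySem.Dict.keys] at hk
  | succ M ih =>
    obtain ⟨ih1, ih2, ih3⟩ := ih
    have hstep : (6 : Int) + ((M + 1 : Nat) : Int) = (6 + (M : Int)) + 1 := by push_cast; ring
    rw [hstep, PySem.List.pyRange_one_succ_right (by omega), List.foldl_append, List.foldl_append,
        ← ih1]
    set dA := (PySem.List.pyRange 6 (6 + (M : Int)) 1).foldl (gA mn mx) (PySem.Dict.empty : PySem.Dict Int Int) with hdA
    have hnk : (6 + (M : Int)) ∉ dA.keys := by
      intro hmem
      exact absurd (ih3 _ hmem) (by omega)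
    have hstepeq := stepAB mn mx dA (6 + (M : Int)) (by omega) hnk
    simp only [List.foldl_cons, List.foldl_nil]
    refine ⟨hstepeq, ?_, ?_⟩
    · rcases keysA mn mx dA (6 + (M : Int)) hnk with h | h
      · rw [h]; exact ih2
      · rw [h]
        refine List.Nodup.append ih2 (List.nodup_singleton _) ?_
        intro a ha hb
        simp only [List.mem_singleton] at hb
        rw [hb] at ha
        exact hnk ha
    · intro k hk
      rcases keysA mn mx dA (6 + (M : Int)) hnk with h | h
      · rw [h] at hk
        have := ih3 k hk
        omega
      · rw [h] at hk
        rcases List.mem_append.mp hk with h2 | h2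
        · have := ih3 k h2
          omega
        · simp at h2
          omega
theorem portA_eq (mn mx : Int) : find_possible_xv mn mx =
    ((PySem.List.pyRange 6 (mx + 1) 1).foldl (gA mn mx) (PySem.Dict.empty : PySem.Dict Int Int)).items := rfl

theorem portB_eq (mn mx : Int) : find_possible_xv_alt mn mx =
    ((PySem.List.pyRange 6 (mx + 1) 1).foldl (gB mn mx) (PySem.Dict.empty : PySem.Dict Int Int)).items := rfl

theorem core_equal (mn mx : Int) : find_possible_xv mn mx = find_possible_xv_alt mn mx := by
  rw [portA_eq, portB_eq]
  by_cases h : mx + 1 ≤ 6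
  · rw [PySem.List.pyRange_one_eq_nil h]
    rfl
  · have hN : mx + 1 = 6 + (((mx - 5).toNat : Nat) : Int) := by omega
    rw [hN]
    exact congrArg PySem.Dict.items (outer mn mx (mx - 5).toNat).1

-- ===== VERDICT (by name: the statement is the Claim_ definition above) =====
theorem find_possible_xv_spec : Claim_equal_find_possible_xv := by
  intro mn mx _
  unfold Spec_find_possible_xv
  exact core_equal mn mx
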